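-- pv_equiv track=rewrite | github.com/gwastro/ml-mock-data-challenge-1 | contributions/sensitivity_plot.py | sanitize_latex_string
-- ===== SOURCE A (Python) =====
-- def sanitize_latex_math(inp):
--     inp = inp.replace('~', '\\sim')
--     return inp
--
-- def sanitize_latex_text(inp):
--     inp = inp.replace('\\', '\\textbackslash')
--     inp = inp.replace('_', '\\_')
--     inp = inp.replace('~', '\\texttildelow')
--     return inp
--
-- def sanitize_latex_string(inp, usetex=True):
--     if not usetex:
--         return inp
--     if inp is None:
--         return None
--     parts = inp.split('$')
--     for i, part in enumerate(parts):
--         if i % 2 == 0: #Text mode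
--             parts[i] = sanitize_latex_text(part)
--         else: #Math mode
--             parts[i] = sanitize_latex_math(part)
--     inp = '$'.join(parts)
--     return inp
-- ===== SOURCE B (Python) =====
-- _TEXT_MAP = {'\\': '\\textbackslash', '_': '\\_', '~': '\\texttildelow'}
--
-- def sanitize_latex_string(inp, usetex=True):
--     if not usetex:
--         return inp
--     if inp is None:
--         return None
--     out = []
--     math = False
--     for c in inp:
--         if c == '$':
--             out.append('$')
--             math = not math
--         elif math:
--             out.append('\\sim' if c == '~' else c)
--         else:
--             out.append(_TEXT_MAP.get(c, c))
--     return ''.join(out)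
-- ===== Notes on version B (the rewrite author's own statement) =====
-- stated objective: simpler
-- what changed: Replaces the split-on-dollar / parity-indexed sequential replace chains / rejoin pipeline with a single left-to-right character scan carrying a math-mode flag and a per-character substitution table.
import Mathlib
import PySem

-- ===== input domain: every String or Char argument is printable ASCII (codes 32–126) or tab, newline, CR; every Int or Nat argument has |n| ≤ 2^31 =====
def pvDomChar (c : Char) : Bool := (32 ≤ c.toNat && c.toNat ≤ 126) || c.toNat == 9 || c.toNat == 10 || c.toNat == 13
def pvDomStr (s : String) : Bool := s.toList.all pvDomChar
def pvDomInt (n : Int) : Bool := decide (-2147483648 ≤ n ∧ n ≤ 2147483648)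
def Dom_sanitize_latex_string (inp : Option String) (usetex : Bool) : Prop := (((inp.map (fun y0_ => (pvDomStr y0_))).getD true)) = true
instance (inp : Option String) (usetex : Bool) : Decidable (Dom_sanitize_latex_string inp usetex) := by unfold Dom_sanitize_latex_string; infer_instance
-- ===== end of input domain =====

-- B replaces A's split-on-dollar / parity-indexed replace chains / rejoin pipeline with a
-- single character scan carrying a math-mode flag (objective: simpler, same cost).


-- ===== PORT A =====
-- helper: sanitize_latex_math (Str.replace is a thin wrapper over Chars.replace; we work on char lists)
def sanitizeLatexMathA (inp : List Char) : List Char :=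
  PySem.Chars.replace inp ['~'] "\\sim".toList

-- helper: sanitize_latex_text (sequential replace chain, exactly as in A)
def sanitizeLatexTextA (inp : List Char) : List Char :=
  let s1 := PySem.Chars.replace inp ['\\'] "\\textbackslash".toList
  let s2 := PySem.Chars.replace s1 ['_'] "\\_".toList
  PySem.Chars.replace s2 ['~'] "\\texttildelow".toList

def sanitize_latex_string (inp : Option String) (usetex : Bool) : Option String :=
  if !usetex then inp
  else
    match inp with
    | none => none
    | some s =>
      let parts := PySem.Chars.splitOn s.toList ['$']
      -- for i, part in enumerate(parts): parts[i] = text/math by parity of i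
      let parts := (PySem.List.enumerate parts).map (fun p =>
        if PySem.Int.mod p.1 2 == 0 then sanitizeLatexTextA p.2 else sanitizeLatexMathA p.2)
      some (String.ofList (PySem.Chars.join ['$'] parts))

-- ===== PORT B =====
-- helper: the per-character text-mode table (_TEXT_MAP.get(c, c))
def textCharB (c : Char) : List Char :=
  if c = '\\' then "\\textbackslash".toList
  else if c = '_' then "\\_".toList
  else if c = '~' then "\\texttildelow".toList
  else [c]

-- helper: the body of B's for-loop (out, math updated per character)
def stepB (st : List Char × Bool) (c : Char) : List Char × Bool :=
  if c = '$' then (st.1 ++ ['$'], !st.2)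
  else if st.2 then (st.1 ++ (if c = '~' then "\\sim".toList else [c]), st.2)
  else (st.1 ++ textCharB c, st.2)

def sanitize_latex_string_alt (inp : Option String) (usetex : Bool) : Option String :=
  if !usetex then inp
  else
    match inp with
    | none => none
    | some s =>
      let st := s.toList.foldl stepB ([], false)
      some (String.ofList st.1)

-- ===== PRECONDITION & SPEC =====
def Spec_sanitize_latex_string (inp : Option String) (usetex : Bool) (out : Option String) : Prop := out = sanitize_latex_string_alt inp usetex
instance (inp : Option String) (usetex : Bool) (out : Option String) : Decidable (Spec_sanitize_latex_string inp usetex out) := by unfold Spec_sanitize_latex_string; infer_instance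

-- ===== CLAIM (what is proved, stated in full; the proofs are below) =====
def Claim_equal_sanitize_latex_string : Prop := ∀ (inp : Option String) (usetex : Bool), Dom_sanitize_latex_string inp usetex → Spec_sanitize_latex_string inp usetex (sanitize_latex_string inp usetex)

-- ===== LEMMAS AND PROOFS =====

-- math-mode per-character map ('\\sim' if c == '~' else c)
def mathCharB (c : Char) : List Char := if c = '~' then "\\sim".toList else [c]

-- a structural recursion computing splitOn · ['$']
def mySplit : List Char → List (List Char)
  | [] => [[]]
  | c :: cs =>
    if c = '$' then [] :: mySplit cs
    else
      match mySplit cs with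
      | [] => [[c]]      -- unreachable (mySplit never returns [])
      | h :: t => (c :: h) :: t

-- structural form of B's scan, without the accumulator
def scanCore : List Char → Bool → List Char
  | [], _ => []
  | c :: cs, m =>
    if c = '$' then '$' :: scanCore cs (!m)
    else (if m then mathCharB c else textCharB c) ++ scanCore cs m

-- A's alternating map + '$'-join, structurally
def joinAlt : List (List Char) → Bool → List Char
  | [], _ => []
  | [p], m => p.flatMap (if m then mathCharB else textCharB)
  | p :: q :: r, m => p.flatMap (if m then mathCharB else textCharB) ++ '$' :: joinAlt (q :: r) (!m)

-- A's alternating map alone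
def altMap : List (List Char) → Bool → List (List Char)
  | [], _ => []
  | p :: ps, m => p.flatMap (if m then mathCharB else textCharB) :: altMap ps (!m)

lemma replace_go (c : Char) (new : List Char) (l : List Char) : ∀ (fuel : Nat) (acc : List Char), l.length ≤ fuel →
    PySem.Chars.replace.go [c] new fuel l acc = acc.reverse ++ l.flatMap (fun x => if x = c then new else [x]) := by
  induction l with
  | nil =>
    intro fuel acc _
    cases fuel <;> simp [PySem.Chars.replace.go]
  | cons x t ih =>
    intro fuel acc h
    cases fuel with
    | zero => simp at h
    | succ f =>
      rw [PySem.Chars.replace.go]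
      by_cases hx : x = c
      · subst hx
        simp [List.isPrefixOf, ih f (new.reverse ++ acc) (by simpa using h)]
      · simp [List.isPrefixOf, hx, ih f (x :: acc) (by simpa using h)]
        intro h'; exact absurd h'.symm hx

lemma replace_single (cs : List Char) (c : Char) (new : List Char) :
    PySem.Chars.replace cs [c] new = cs.flatMap (fun x => if x = c then new else [x]) := by
  rw [PySem.Chars.replace]
  simp [replace_go c new cs cs.length [] (le_refl _)]

lemma mySplit_ne_nil (cs : List Char) : mySplit cs ≠ [] := by
  cases cs with
  | nil => simp [mySplit]
  | cons c t =>
    simp only [mySplit]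
    split
    · simp
    · split <;> simp

def mapHead (f : List Char → List Char) : List (List Char) → List (List Char)
  | [] => []
  | h :: t => f h :: t

lemma splitOn_go (l : List Char) : ∀ (fuel : Nat) (cur : List Char) (acc : List (List Char)), l.length ≤ fuel →
    PySem.Chars.splitOn.go ['$'] fuel l cur acc = acc.reverse ++ mapHead (cur.reverse ++ ·) (mySplit l) := by
  induction l with
  | nil =>
    intro fuel cur acc _
    cases fuel <;> simp [PySem.Chars.splitOn.go, mySplit, mapHead]
  | cons x t ih =>
    intro fuel cur acc h
    cases fuel with
    | zero => simp at h
    | succ f =>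
      rw [PySem.Chars.splitOn.go]
      by_cases hx : x = '$'
      · subst hx
        rw [if_pos (by simp [List.isPrefixOf])]
        rw [show List.drop ['$'].length ('$' :: t) = t from rfl]
        rw [ih f [] (cur.reverse :: acc) (by simpa using h)]
        simp [mySplit, mapHead]
        cases mySplit t <;> rfl
      · rw [if_neg (by simp [List.isPrefixOf, Ne.symm hx])]
        rw [ih f (x :: cur) acc (by simpa using h)]
        simp only [mySplit, if_neg hx]
        obtain ⟨hh, tt, he⟩ : ∃ hh tt, mySplit t = hh :: tt := by
          cases hm : mySplit t with
          | nil => exact absurd hm (mySplit_ne_nil t)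
          | cons a b => exact ⟨a, b, rfl⟩
        rw [he]
        simp [mapHead]

lemma splitOn_dollar (cs : List Char) :
    PySem.Chars.splitOn cs ['$'] = mySplit cs := by
  rw [PySem.Chars.splitOn, splitOn_go cs (cs.length + 1) [] [] (by omega)]
  cases hm : mySplit cs with
  | nil => exact absurd hm (mySplit_ne_nil cs)
  | cons a b => simp [mapHead]

lemma text_chain (cs : List Char) : sanitizeLatexTextA cs = cs.flatMap textCharB := by
  simp only [sanitizeLatexTextA]
  rw [replace_single, replace_single, replace_single, List.flatMap_assoc, List.flatMap_assoc]
  congr 1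
  funext x
  by_cases h1 : x = '\\'
  · subst h1; decide
  by_cases h2 : x = '_'
  · subst h2; decide
  by_cases h3 : x = '~'
  · subst h3; decide
  simp [h1, h2, h3, textCharB]

lemma math_chain (cs : List Char) : sanitizeLatexMathA cs = cs.flatMap mathCharB := by
  simp only [sanitizeLatexMathA]
  rw [replace_single]
  congr 1

lemma parity_succ (i : Int) :
    (PySem.Int.mod (i + 1) 2 == 0) = !(PySem.Int.mod i 2 == 0) := by
  rw [PySem.Int.mod_eq_emod_of_pos (by norm_num : (0:Int) < 2), PySem.Int.mod_eq_emod_of_pos (by norm_num : (0:Int) < 2)]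
  by_cases h2 : i % 2 = 0
  · have : (i + 1) % 2 = 1 := by omega
    simp [h2, this]
  · have h1 : i % 2 = 1 := by omega
    have : (i + 1) % 2 = 0 := by omega
    simp [h1, this]

lemma enumerate_parity (parts : List (List Char)) (i : Int) :
    (PySem.List.enumerate parts i).map (fun p =>
        if PySem.Int.mod p.1 2 == 0 then sanitizeLatexTextA p.2 else sanitizeLatexMathA p.2)
      = altMap parts (!(PySem.Int.mod i 2 == 0)) := by
  induction parts generalizing i with
  | nil => simp [PySem.List.enumerate_nil, altMap]
  | cons p ps ih =>
    rw [PySem.List.enumerate_cons, List.map_cons, ih (i + 1), parity_succ i]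
    simp only [altMap]
    by_cases hm : (PySem.Int.mod i 2 == 0) = true
    · rw [hm]
      simp [text_chain]
    · have hm' : (PySem.Int.mod i 2 == 0) = false := by simpa using hm
      rw [hm']
      simp [math_chain]

lemma join_altMap (parts : List (List Char)) (m : Bool) :
    PySem.Chars.join ['$'] (altMap parts m) = joinAlt parts m := by
  induction parts generalizing m with
  | nil => simp [altMap, joinAlt, PySem.Chars.join_nil]
  | cons p ps ih =>
    cases ps with
    | nil => simp [altMap, joinAlt, PySem.Chars.join_singleton]
    | cons q r =>
      rw [show altMap (p :: q :: r) m = (p.flatMap (if m then mathCharB else textCharB)) :: altMap (q :: r) (!m) from rfl]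
      have h2 : altMap (q :: r) (!m) = (q.flatMap (if !m then mathCharB else textCharB)) :: altMap r (!(!m)) := rfl
      rw [h2, PySem.Chars.join_cons_cons, ← h2, ih (!m)]
      simp [joinAlt]

lemma joinAlt_mySplit (cs : List Char) (m : Bool) :
    joinAlt (mySplit cs) m = scanCore cs m := by
  induction cs generalizing m with
  | nil => simp [mySplit, joinAlt, scanCore]
  | cons c t ih =>
    by_cases hc : c = '$'
    · subst hc
      rw [show mySplit ('$' :: t) = [] :: mySplit t from by simp [mySplit]]
      obtain ⟨hh, tt, he⟩ : ∃ hh tt, mySplit t = hh :: tt := by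
        cases hm : mySplit t with
        | nil => exact absurd hm (mySplit_ne_nil t)
        | cons a b => exact ⟨a, b, rfl⟩
      rw [he]
      rw [show joinAlt ([] :: hh :: tt) m = ([] : List Char).flatMap (if m then mathCharB else textCharB) ++ '$' :: joinAlt (hh :: tt) (!m) from rfl]
      simp [scanCore, ← he, ih]
    · rw [show mySplit (c :: t) = (match mySplit t with | [] => [[c]] | h :: t' => (c :: h) :: t') from by simp [mySplit, hc]]
      obtain ⟨hh, tt, he⟩ : ∃ hh tt, mySplit t = hh :: tt := by
        cases hm : mySplit t with
        | nil => exact absurd hm (mySplit_ne_nil t)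
        | cons a b => exact ⟨a, b, rfl⟩
      rw [he]
      cases tt with
      | nil =>
        have hsub : hh.flatMap (if m then mathCharB else textCharB) = scanCore t m := by
          rw [← ih m, he]; simp [joinAlt]
        show (c :: hh).flatMap (if m then mathCharB else textCharB) = scanCore (c :: t) m
        rw [List.flatMap_cons]
        rw [show scanCore (c :: t) m = (if m then mathCharB c else textCharB c) ++ scanCore t m from by simp [scanCore, hc]]
        rw [← hsub]
        cases m <;> simp
      | cons q r =>
        have hsub : hh.flatMap (if m then mathCharB else textCharB) ++ '$' :: joinAlt (q :: r) (!m) = scanCore t m := by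
          rw [← ih m, he]; simp [joinAlt]
        show (c :: hh).flatMap (if m then mathCharB else textCharB) ++ '$' :: joinAlt (q :: r) (!m) = scanCore (c :: t) m
        rw [List.flatMap_cons, List.append_assoc]
        rw [show scanCore (c :: t) m = (if m then mathCharB c else textCharB c) ++ scanCore t m from by simp [scanCore, hc]]
        rw [← hsub]
        cases m <;> simp

lemma foldl_scan (cs acc : List Char) (m : Bool) :
    (cs.foldl stepB (acc, m)).1 = acc ++ scanCore cs m := by
  induction cs generalizing acc m with
  | nil => simp [scanCore]
  | cons c t ih =>
    rw [List.foldl_cons]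
    by_cases hc : c = '$'
    · subst hc
      rw [show stepB (acc, m) '$' = (acc ++ ['$'], !m) from by simp [stepB]]
      rw [ih]
      simp [scanCore]
    · by_cases hm : m
      · subst hm
        rw [show stepB (acc, true) c = (acc ++ mathCharB c, true) from by simp [stepB, hc, mathCharB]]
        rw [ih]
        simp [scanCore, hc]
      · simp only [Bool.not_eq_true] at hm; subst hm
        rw [show stepB (acc, false) c = (acc ++ textCharB c, false) from by simp [stepB, hc]]
        rw [ih]
        simp [scanCore, hc]

-- ===== VERDICT (by name: the statement is the Claim_ definition above) =====
theorem sanitize_latex_string_spec : Claim_equal_sanitize_latex_string := by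
  intro inp usetex _
  unfold Spec_sanitize_latex_string sanitize_latex_string sanitize_latex_string_alt
  cases usetex with
  | false => rfl
  | true =>
    cases inp with
    | none => rfl
    | some s =>
      simp only [Bool.not_true, if_neg (by decide : ¬ (false = true))]
      rw [splitOn_dollar, enumerate_parity _ 0, join_altMap, foldl_scan]
      have h0 : (!(PySem.Int.mod 0 2 == 0)) = false := by decide
      rw [h0, joinAlt_mySplit]
      simp
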